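-- pv_equiv track=rewrite | github.com/hellowhaaa/new_remote-assignments | Week-1/Assignment-4/algorithm_practice.py | binary_search_position
-- ===== SOURCE A (Python) =====
-- def binary_search_position(numbers, target):
--     low = 0
--     high = len(numbers)
--     while low < high:
--         mid = (low + high) // 2
--         if numbers[mid] < target:
--             low = mid + 1
--         else:
--             high = mid
--     return low
-- ===== SOURCE B (Python) =====
-- def binary_search_position(numbers, target):
--     if not numbers:
--         return 0
--     mid = len(numbers) // 2
--     if numbers[mid] < target:
--         return mid + 1 + binary_search_position(numbers[mid + 1:], target)
--     return binary_search_position(numbers[:mid], target)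
-- ===== Notes on version B (the rewrite author's own statement) =====
-- stated objective: alternative
-- what changed: Replaces the iterative low/high index loop with a recursive divide-and-conquer on list slices: compare the middle element, then recurse on the left or right half, adding the offset on the right; no index state is maintained.
import Mathlib
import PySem

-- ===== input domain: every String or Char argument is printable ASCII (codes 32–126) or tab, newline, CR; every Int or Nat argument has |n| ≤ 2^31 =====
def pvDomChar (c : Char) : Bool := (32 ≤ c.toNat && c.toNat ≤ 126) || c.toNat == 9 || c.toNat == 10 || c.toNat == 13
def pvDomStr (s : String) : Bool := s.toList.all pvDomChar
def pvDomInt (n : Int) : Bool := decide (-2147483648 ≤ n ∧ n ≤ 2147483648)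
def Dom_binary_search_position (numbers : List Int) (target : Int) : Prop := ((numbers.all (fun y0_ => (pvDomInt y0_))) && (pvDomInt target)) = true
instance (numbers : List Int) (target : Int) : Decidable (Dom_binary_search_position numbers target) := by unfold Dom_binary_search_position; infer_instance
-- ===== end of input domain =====

-- B replaces A's iterative low/high index loop by a recursive divide-and-conquer on list
-- slices (objective: alternative); it returns the same value on every input, sorted or not.

-- ===== PORT A =====
-- the 'while low < high' loop: one recursive call per iteration over the same state (low, high),
-- run on a structural fuel counter; numbers.length iterations always suffice because high - low
-- shrinks by at least one per iteration, and when fuel runs out low = high, the loop's exit state.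
-- numbers[mid] is always in range when the body runs from the initial call (0 <= low <= mid < high <= len),
-- so pyGetD ports the indexing exactly there.
def bspLoop (numbers : List Int) (target : Int) : Nat → Int → Int → Int
  | 0, low, _high => low
  | fuel + 1, low, high =>
    if low < high then
      let mid := PySem.Int.floordiv (low + high) 2
      if PySem.List.pyGetD numbers mid 0 < target then
        bspLoop numbers target fuel (mid + 1) high
      else
        bspLoop numbers target fuel low mid
    else low

def binary_search_position (numbers : List Int) (target : Int) : Int :=
  bspLoop numbers target numbers.length 0 (numbers.length : Int)

-- ===== PORT B =====
-- recursive divide-and-conquer on slices: numbers[mid+1:] and numbers[:mid] are PySem.List.slice;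
-- the recursion is run on a structural fuel counter, numbers.length levels always suffice because
-- each recursive call is on a strictly shorter list (and on empty input the answer is 0 directly).
def bsrAux (target : Int) : Nat → List Int → Int
  | 0, _ => 0
  | fuel + 1, numbers =>
    if numbers = [] then 0
    else
      let mid := numbers.length / 2
      if PySem.List.pyGetD numbers (mid : Int) 0 < target then
        (mid : Int) + 1 +
          bsrAux target fuel (PySem.List.slice numbers (some ((mid : Int) + 1)) none)
      else
        bsrAux target fuel (PySem.List.slice numbers none (some (mid : Int)))

def binary_search_position_alt (numbers : List Int) (target : Int) : Int :=
  bsrAux target numbers.length numbers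

-- ===== PRECONDITION & SPEC =====
def Spec_binary_search_position (numbers : List Int) (target : Int) (out : Int) : Prop := out = binary_search_position_alt numbers target
instance (numbers : List Int) (target : Int) (out : Int) : Decidable (Spec_binary_search_position numbers target out) := by unfold Spec_binary_search_position; infer_instance

-- ===== CLAIM (what is proved, stated in full; the proofs are below) =====
def Claim_equal_binary_search_position : Prop := ∀ (numbers : List Int) (target : Int), Dom_binary_search_position numbers target → Spec_binary_search_position numbers target (binary_search_position numbers target)

-- ===== LEMMAS AND PROOFS =====

-- B's recursion returns 0 on the empty list whatever fuel is left
lemma bsrAux_nil (t : Int) (fb : Nat) : bsrAux t fb [] = 0 := by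
  cases fb <;> simp [bsrAux]

-- the key invariant: A's loop on the index window [lo, hi) computes lo plus B's recursion on
-- the sublist (xs.drop lo).take (hi - lo); the midpoints coincide, so the comparisons coincide.
-- Both fuels only need to dominate the window size hi - lo.
lemma bspLoop_eq_bsrAux_window : ∀ (fa : Nat) (xs : List Int) (t : Int) (lo hi : Nat) (fb : Nat),
    hi - lo ≤ fa → hi - lo ≤ fb → lo ≤ hi → hi ≤ xs.length →
    bspLoop xs t fa (lo : Int) (hi : Int)
      = (lo : Int) + bsrAux t fb ((xs.drop lo).take (hi - lo)) := by
  intro fa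
  induction fa with
  | zero =>
    intro xs t lo hi fb hfa hfb hle _
    have heq : lo = hi := by omega
    subst heq
    simp [bspLoop, bsrAux_nil]
  | succ n ih =>
    intro xs t lo hi fb hfa hfb hle hlen
    by_cases hlt : lo < hi
    · -- the loop body runs: fb is positive since the window is nonempty
      obtain ⟨fb', rfl⟩ : ∃ fb', fb = fb' + 1 := ⟨fb - 1, by omega⟩
      -- midpoints
      obtain ⟨m, hm⟩ : ∃ m, m = (lo + hi) / 2 := ⟨_, rfl⟩
      have hlom : lo ≤ m := by omega
      have hmhi : m < hi := by omega
      have hmid : PySem.Int.floordiv ((lo : Int) + (hi : Int)) 2 = (m : Int) := by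
        rw [PySem.Int.floordiv_eq_ediv_of_pos (by omega)]
        omega
      -- the window and its midpoint
      obtain ⟨w, hw⟩ : ∃ w, w = (xs.drop lo).take (hi - lo) := ⟨_, rfl⟩
      have hwlen : w.length = hi - lo := by
        rw [hw]; simp; omega
      have hwne : w ≠ [] := by
        intro h; rw [h] at hwlen; simp at hwlen; omega
      have hwmid : w.length / 2 = m - lo := by
        rw [hwlen]; omega
      -- the compared elements coincide
      have hidx : m - lo < hi - lo := by omega
      have hget : PySem.List.pyGetD w (((m - lo : Nat)) : Int) 0 = PySem.List.pyGetD xs (m : Int) 0 := by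
        rw [PySem.List.pyGetD_natCast, PySem.List.pyGetD_natCast]
        simp only [List.getD_eq_getElem?_getD, hw, List.getElem?_take, List.getElem?_drop]
        rw [if_pos hidx]
        have hlm : lo + (m - lo) = m := by omega
        rw [hlm]
      rw [bspLoop, if_pos (by exact_mod_cast hlt)]
      simp only [hmid]
      conv_rhs => rw [bsrAux]
      rw [← hw, if_neg hwne]
      simp only [hwmid]
      by_cases hcmp : PySem.List.pyGetD xs (m : Int) 0 < t
      · rw [if_pos hcmp, if_pos (by rw [hget]; exact hcmp)]
        have hcast : (m : Int) + 1 = ((m + 1 : Nat) : Int) := by push_cast; ring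
        rw [hcast, ih xs t (m + 1) hi fb' (by omega) (by omega) (by omega) hlen]
        have hslice : PySem.List.slice w (some ((((m - lo : Nat)) : Int) + 1)) none
            = (xs.drop (m + 1)).take (hi - (m + 1)) := by
          have h1 : (((m - lo : Nat)) : Int) + 1 = (((m - lo + 1 : Nat)) : Int) := by push_cast; ring
          rw [h1, PySem.List.slice_from_natCast, hw, List.drop_take, List.drop_drop]
          have e1 : (hi - lo) - (m - lo + 1) = hi - (m + 1) := by omega
          have e2 : lo + (m - lo + 1) = m + 1 := by omega
          rw [e1, e2]
        rw [hslice]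
        have hsub : ((m - lo : Nat) : Int) = (m : Int) - (lo : Int) := by omega
        rw [hsub]
        push_cast
        ring
      · rw [if_neg hcmp, if_neg (by rw [hget]; exact hcmp)]
        rw [ih xs t lo m fb' (by omega) (by omega) (by omega) (by omega)]
        have hslice : PySem.List.slice w none (some (((m - lo : Nat)) : Int))
            = (xs.drop lo).take (m - lo) := by
          rw [PySem.List.slice_to_natCast, hw, List.take_take]
          have e1 : min (m - lo) (hi - lo) = m - lo := by omega
          rw [e1]
        rw [hslice]
    · have hEq : lo = hi := by omega
      subst hEq
      rw [bspLoop, if_neg (by exact_mod_cast hlt)]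
      simp [bsrAux_nil]

-- ===== VERDICT (by name: the statement is the Claim_ definition above) =====
theorem binary_search_position_spec : Claim_equal_binary_search_position := by
  intro numbers target _
  unfold Spec_binary_search_position binary_search_position binary_search_position_alt
  have h := bspLoop_eq_bsrAux_window numbers.length numbers target 0 numbers.length
    numbers.length (by omega) (by omega) (by omega) (le_refl _)
  simpa using h
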